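-- pv_equiv track=rewrite | github.com/oscarpitcho/minimizerschemes | utils.py | find_minimizers_in_string
-- ===== SOURCE A (Python) =====
-- from typing import List, Set, Tuple, Dict
--
-- def find_minimizers_in_string(s, minimizers)-> List[str]:
--     minimizer_lengths = [len(m) for m in minimizers]
--     smallest_min = min(minimizer_lengths) if len(minimizer_lengths) > 0 else 0
--     encoded_s = []
--     i = 0
--
--     while i < len(s) - smallest_min + 1:
--         found = False
--         for j in range(len(minimizers)):
--             if s[i:i + len(minimizers[j])] == minimizers[j]:
--                 encoded_s.append(f'M_{j}')
--                 i += len(minimizers[j])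
--                 found = True
--                 break
--
--         if not found:
--             i += 1
--     return encoded_s
-- ===== SOURCE B (Python) =====
-- def find_minimizers_in_string(s, minimizers):
--     # Bucket minimizers by first character so each position only tries candidates
--     # that can actually start here (empty minimizers are unmatchable and skipped).
--     entries = [(m[0], (j, m)) for j, m in enumerate(minimizers) if m]
--     buckets = {}
--     for c, e in entries:
--         buckets[c] = buckets.get(c, []) + [e]
--     out = []
--     i, n = 0, len(s)
--     while i < n:
--         for j, m in buckets.get(s[i], []):
--             if s.startswith(m, i):
--                 out.append(f'M_{j}')
--                 i += len(m)
--                 break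
--         else:
--             i += 1
--     return out
-- ===== Notes on version B (the rewrite author's own statement) =====
-- stated objective: faster
-- what changed: B pre-buckets the minimizers by their first character into a dict built once, so at each string position only candidates starting with s[i] are tried (checked with startswith) instead of slicing and comparing against every minimizer, and the greedy scan runs to the end of the string without the smallest-length bound.
import Mathlib
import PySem

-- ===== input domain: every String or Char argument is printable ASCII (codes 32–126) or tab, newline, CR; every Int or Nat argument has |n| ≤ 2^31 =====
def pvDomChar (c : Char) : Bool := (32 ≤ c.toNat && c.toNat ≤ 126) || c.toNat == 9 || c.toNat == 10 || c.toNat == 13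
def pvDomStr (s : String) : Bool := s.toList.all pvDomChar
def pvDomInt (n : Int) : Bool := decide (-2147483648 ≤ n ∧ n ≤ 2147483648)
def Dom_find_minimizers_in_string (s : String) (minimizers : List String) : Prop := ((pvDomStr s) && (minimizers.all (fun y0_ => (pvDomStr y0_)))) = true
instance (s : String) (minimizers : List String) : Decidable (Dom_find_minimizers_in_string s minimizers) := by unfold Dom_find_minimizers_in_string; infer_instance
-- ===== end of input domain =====

-- B pre-buckets the minimizers by first character (dict built once) so each position
-- tries only candidates that can start there; same greedy left-to-right result.

-- ===== PORT A =====
-- inner 'for j in range(len(minimizers)): if s[i:i+len(minimizers[j])] == minimizers[j]: break'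
def fmisInner (sl : List Char) (i : Int) : List String → Int → Option (Int × Nat)
  | [], _ => none
  | m :: rest, j =>
    if PySem.List.slice sl (some i) (some (i + (m.toList.length : Int))) = m.toList
    then some (j, m.toList.length)
    else fmisInner sl i rest (j + 1)

-- the 'while i < len(s) - smallest_min + 1' loop (fuel bounds the iteration count)
def fmisLoopA (sl : List Char) (ms : List String) (smallest : Int) :
    Nat → Int → List String → List String
  | 0, _, acc => acc
  | fuel + 1, i, acc =>
    if i < (sl.length : Int) - smallest + 1 then
      match fmisInner sl i ms 0 with
      | some (j, ln) => fmisLoopA sl ms smallest fuel (i + (ln : Int)) (acc ++ ["M_" ++ PySem.Int.toStr j])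
      | none => fmisLoopA sl ms smallest fuel (i + 1) acc
    else acc

def find_minimizers_in_string (s : String) (minimizers : List String) : List String :=
  let sl := s.toList
  let minimizer_lengths : List Int := minimizers.map (fun m => (m.toList.length : Int))
  let smallest_min : Int :=
    if minimizer_lengths.length > 0 then (PySem.List.min? minimizer_lengths (fun x => x)).getD 0 else 0
  fmisLoopA sl minimizers smallest_min (sl.length + 1) 0 []

-- ===== PORT B =====
-- 'for j, m in buckets.get(s[i], []): if s.startswith(m, i): break'
def fmisFindB (tail : List Char) : List (Int × List Char) → Option (Int × List Char)
  | [] => none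
  | (j, m) :: rest => if m.isPrefixOf tail then some (j, m) else fmisFindB tail rest

-- the 'while i < n' loop of B (fuel bounds the iteration count)
def fmisLoopB (sl : List Char) (d : PySem.Dict Char (List (Int × List Char))) :
    Nat → Nat → List String → List String
  | 0, _, acc => acc
  | fuel + 1, i, acc =>
    match sl[i]? with
    | none => acc
    | some c =>
      match fmisFindB (sl.drop i) (d.getD c []) with
      | some (j, m) => fmisLoopB sl d fuel (i + m.length) (acc ++ ["M_" ++ PySem.Int.toStr j])
      | none => fmisLoopB sl d fuel (i + 1) acc

def find_minimizers_in_string_alt (s : String) (minimizers : List String) : List String :=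
  let sl := s.toList
  -- entries = [(m[0], (j, m)) for j, m in enumerate(minimizers) if m]
  let entries : List (Char × (Int × List Char)) :=
    (PySem.List.enumerate minimizers 0).filterMap (fun p =>
      match p.2.toList with
      | [] => none
      | c :: _ => some (c, (p.1, p.2.toList)))
  -- buckets[c] = buckets.get(c, []) + [e]
  let buckets := entries.foldl (fun d p => d.modify p.1 [] (· ++ [p.2])) PySem.Dict.empty
  fmisLoopB sl buckets (sl.length + 1) 0 []

-- ===== PRECONDITION & SPEC =====
-- Pre_ excludes only minimizer lists containing the empty string: there Python A loops forever
-- (the empty string matches at the final position without advancing i), so A returns nothing.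
def Pre_find_minimizers_in_string (s : String) (minimizers : List String) : Prop :=
  "" ∉ minimizers
instance (s : String) (minimizers : List String) : Decidable (Pre_find_minimizers_in_string s minimizers) := by unfold Pre_find_minimizers_in_string; infer_instance

def pvWitness_find_minimizers_in_string : String × List String := ("abcabd", ["ab", "cab"])

def Spec_find_minimizers_in_string (s : String) (minimizers : List String) (out : List String) : Prop := out = find_minimizers_in_string_alt s minimizers
instance (s : String) (minimizers : List String) (out : List String) : Decidable (Spec_find_minimizers_in_string s minimizers out) := by unfold Spec_find_minimizers_in_string; infer_instance

-- ===== CLAIM (what is proved, stated in full; the proofs are below) =====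
def Claim_equal_find_minimizers_in_string : Prop := ∀ (s : String) (minimizers : List String), Dom_find_minimizers_in_string s minimizers → Pre_find_minimizers_in_string s minimizers → Spec_find_minimizers_in_string s minimizers (find_minimizers_in_string s minimizers)

-- ===== LEMMAS AND PROOFS =====

-- proof-side name for B's bucket dictionary
def fmisBuckets (ms : List String) : PySem.Dict Char (List (Int × List Char)) :=
  ((PySem.List.enumerate ms 0).filterMap (fun p =>
      match p.2.toList with
      | [] => none
      | c :: _ => some (c, (p.1, p.2.toList)))).foldl
    (fun d p => d.modify p.1 [] (· ++ [p.2])) PySem.Dict.empty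

theorem alt_eq (s : String) (ms : List String) :
    find_minimizers_in_string_alt s ms =
      fmisLoopB s.toList (fmisBuckets ms) (s.toList.length + 1) 0 [] := rfl

-- bucket of candidates whose minimizer starts with c, in index order (proof-side spec)
def fmisBucket (c : Char) : List String → Int → List (Int × List Char)
  | [], _ => []
  | m :: rest, q =>
    match m.toList with
    | [] => fmisBucket c rest (q + 1)
    | c' :: _ =>
      if c' = c then (q, m.toList) :: fmisBucket c rest (q + 1) else fmisBucket c rest (q + 1)

theorem fmisBucket_spec (c : Char) (ms : List String) (q : Int) :
    (((PySem.List.enumerate ms q).filterMap (fun p =>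
        match p.2.toList with
        | [] => none
        | c :: _ => some (c, (p.1, p.2.toList)))).filter
      (fun p => p.1 == c)).map (·.2) = fmisBucket c ms q := by
  induction ms generalizing q with
  | nil => simp [PySem.List.enumerate_nil, fmisBucket]
  | cons m rest ih =>
    rw [PySem.List.enumerate_cons]
    cases hml : m.toList with
    | nil => simpa [fmisBucket, hml] using ih (q + 1)
    | cons c' t =>
      by_cases hcc : c' = c
      · subst hcc
        simpa [fmisBucket, hml] using ih (q + 1)
      · simp [fmisBucket, hml, hcc, ih (q + 1)]

theorem fmisBucket_mem (c : Char) (ms : List String) (q : Int) (p : Int × List Char)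
    (hp : p ∈ fmisBucket c ms q) : ∃ m ∈ ms, p.2 = m.toList := by
  induction ms generalizing q with
  | nil => simp [fmisBucket] at hp
  | cons m rest ih =>
    unfold fmisBucket at hp
    cases hml : m.toList with
    | nil =>
      simp only [hml] at hp
      obtain ⟨m', hm', he⟩ := ih (q + 1) hp
      exact ⟨m', by simp [hm'], he⟩
    | cons c' t =>
      by_cases hcc : c' = c
      · simp only [hml, if_pos hcc, List.mem_cons] at hp
        rcases hp with h | hp
        · exact ⟨m, by simp, by simp [h, hml]⟩
        · obtain ⟨m', hm', he⟩ := ih (q + 1) hp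
          exact ⟨m', by simp [hm'], he⟩
      · simp only [hml, if_neg hcc] at hp
        obtain ⟨m', hm', he⟩ := ih (q + 1) hp
        exact ⟨m', by simp [hm'], he⟩

theorem fmisFindB_none (tail : List Char) (l : List (Int × List Char))
    (h : ∀ p ∈ l, ¬ p.2.isPrefixOf tail) : fmisFindB tail l = none := by
  induction l with
  | nil => rfl
  | cons p rest ih =>
    obtain ⟨j, m⟩ := p
    have hm : m.isPrefixOf tail = false := by
      have := h (j, m) (by simp)
      simpa [Bool.eq_false_iff, List.isPrefixOf_iff_prefix] using this
    simp only [fmisFindB, hm, Bool.false_eq_true, if_false]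
    exact ih (fun p hp => h p (by simp [hp]))

-- inner search equivalence at a position i with character c
theorem fmisInner_eq (sl : List Char) (iN : Nat) (c : Char) (t : List Char)
    (hdrop : sl.drop iN = c :: t) (ms : List String) (q : Int)
    (hne : ∀ m ∈ ms, m.toList ≠ []) :
    fmisInner sl (iN : Int) ms q =
      (fmisFindB (sl.drop iN) (fmisBucket c ms q)).map (fun p => (p.1, p.2.length)) := by
  induction ms generalizing q with
  | nil => simp [fmisInner, fmisBucket, fmisFindB]
  | cons m rest ih =>
    have ihq := ih (q + 1) (fun m2 hm2 => hne m2 (by simp [hm2]))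
    cases hmc : m.toList with
    | nil => exact absurd hmc (hne m (by simp))
    | cons c' t' =>
      have hslice : PySem.List.slice sl (some (iN : Int)) (some ((iN : Int) + (m.toList.length : Int)))
          = (sl.drop iN).take m.toList.length := PySem.List.slice_natCast_add sl iN m.toList.length
      have hcond : (PySem.List.slice sl (some (iN : Int)) (some ((iN : Int) + (m.toList.length : Int))) = m.toList)
          ↔ m.toList.isPrefixOf (sl.drop iN) = true := by
        rw [hslice, List.isPrefixOf_iff_prefix, List.prefix_iff_eq_take, eq_comm]
      have hcond' : (PySem.List.slice sl (some (iN : Int)) (some ((iN : Int) + (((c' :: t').length : Nat) : Int))) = c' :: t')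
          ↔ (c' :: t').isPrefixOf (sl.drop iN) = true := by
        rw [← hmc]; exact hcond
      by_cases hcc : c' = c
      · subst hcc
        unfold fmisInner fmisBucket
        simp only [hmc, if_true]
        by_cases hpre : (c' :: t').isPrefixOf (sl.drop iN) = true
        · rw [if_pos (hcond'.mpr hpre)]
          simp only [fmisFindB, hpre, if_true, Option.map_some]
        · rw [if_neg (fun hx => hpre (hcond'.mp hx))]
          have hpre' : (c' :: t').isPrefixOf (sl.drop iN) = false := Bool.eq_false_iff.mpr hpre
          simp only [fmisFindB, hpre', Bool.false_eq_true, if_false]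
          exact ihq
      · have hnotpre : ¬ (c' :: t').isPrefixOf (sl.drop iN) = true := by
          rw [List.isPrefixOf_iff_prefix, hdrop]
          intro hp
          exact hcc (List.cons_prefix_cons.mp hp).1
        unfold fmisInner fmisBucket
        simp only [hmc]
        rw [if_neg (fun hx => hnotpre (hcond'.mp hx)), if_neg hcc]
        exact ihq

theorem fmisBuckets_getD (ms : List String) (c : Char) :
    (fmisBuckets ms).getD c [] = fmisBucket c ms 0 := by
  unfold fmisBuckets
  rw [PySem.Dict.getD_foldl_modify_append, PySem.Dict.getD_empty]
  simpa using fmisBucket_spec c ms 0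

-- B's loop is inert once fewer than 'smallest' characters remain
theorem fmisLoopB_dead (sl : List Char) (ms : List String) (S : Int)
    (hS : ∀ m ∈ ms, S ≤ (m.toList.length : Int)) :
    ∀ (fuel iN : Nat) (acc : List String), (sl.length : Int) - S + 1 ≤ (iN : Int) →
      fmisLoopB sl (fmisBuckets ms) fuel iN acc = acc := by
  intro fuel
  induction fuel with
  | zero => intro iN acc _; rfl
  | succ fuel ih =>
    intro iN acc hbound
    cases hg : sl[iN]? with
    | none => simp only [fmisLoopB, hg]
    | some c =>
      have hiN : iN < sl.length := by
        by_contra hge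
        rw [List.getElem?_eq_none (by omega)] at hg
        simp at hg
      have hfind : fmisFindB (sl.drop iN) (fmisBucket c ms 0) = none := by
        apply fmisFindB_none
        intro p hp hpre
        obtain ⟨m, hm, he⟩ := fmisBucket_mem c ms 0 p hp
        have hlen : p.2.length ≤ (sl.drop iN).length := (List.isPrefixOf_iff_prefix.mp hpre).length_le
        rw [List.length_drop] at hlen
        have hSm := hS m hm
        rw [← he] at hSm
        omega
      simp only [fmisLoopB, hg, fmisBuckets_getD, hfind]
      exact ih (iN + 1) acc (by push_cast; omega)

theorem main_loop_eq (sl : List Char) (ms : List String) (S : Int)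
    (hne : ∀ m ∈ ms, m.toList ≠ [])
    (hS1 : 1 ≤ S) (hS : ∀ m ∈ ms, S ≤ (m.toList.length : Int)) :
    ∀ (fuel iN : Nat) (acc : List String),
      fmisLoopA sl ms S fuel (iN : Int) acc =
        fmisLoopB sl (fmisBuckets ms) fuel iN acc := by
  intro fuel
  induction fuel with
  | zero => intro iN acc; rfl
  | succ fuel ih =>
    intro iN acc
    by_cases hc : (iN : Int) < (sl.length : Int) - S + 1
    · have hiN : iN < sl.length := by omega
      have hdrop := List.drop_eq_getElem_cons hiN
      have hg : sl[iN]? = some sl[iN] := List.getElem?_eq_getElem hiN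
      have hinner := fmisInner_eq sl iN sl[iN] (sl.drop (iN + 1)) hdrop ms 0 hne
      simp only [fmisLoopA, fmisLoopB, if_pos hc, hg, fmisBuckets_getD, hinner]
      cases hf : fmisFindB (sl.drop iN) (fmisBucket sl[iN] ms 0) with
      | none =>
        simp only [Option.map_none]
        have := ih (iN + 1) acc
        push_cast at this
        exact this
      | some p =>
        obtain ⟨j, m⟩ := p
        simp only [Option.map_some]
        have := ih (iN + m.length) (acc ++ ["M_" ++ PySem.Int.toStr j])
        push_cast at this
        exact this
    · simp only [fmisLoopA, if_neg hc]
      exact (fmisLoopB_dead sl ms S hS (fuel + 1) iN acc (by omega)).symm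

theorem fmisLoopA_nil (sl : List Char) (S : Int) :
    ∀ (fuel : Nat) (i : Int) (acc : List String), fmisLoopA sl [] S fuel i acc = acc := by
  intro fuel
  induction fuel with
  | zero => intro i acc; rfl
  | succ fuel ih =>
    intro i acc
    simp only [fmisLoopA, fmisInner]
    split
    · exact ih (i + 1) acc
    · rfl

theorem fmisLoopB_empty (sl : List Char) :
    ∀ (fuel i : Nat) (acc : List String), fmisLoopB sl (fmisBuckets []) fuel i acc = acc := by
  intro fuel
  induction fuel with
  | zero => intro i acc; rfl
  | succ fuel ih =>
    intro i acc
    cases hg : sl[i]? with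
    | none => simp only [fmisLoopB, hg]
    | some c =>
      simp only [fmisLoopB, hg, fmisBuckets_getD, fmisBucket, fmisFindB]
      exact ih (i + 1) acc

-- ===== VERDICT (by name: the statement is the Claim_ definition above) =====
theorem find_minimizers_in_string_spec : Claim_equal_find_minimizers_in_string := by
  intro s ms hdom hpre
  unfold Spec_find_minimizers_in_string
  rw [alt_eq]
  cases ms with
  | nil =>
    exact (fmisLoopA_nil s.toList 0 (s.toList.length + 1) 0 []).trans
      (fmisLoopB_empty s.toList (s.toList.length + 1) 0 []).symm
  | cons m0 rest =>
    have hne : ∀ mm ∈ m0 :: rest, mm.toList ≠ [] := by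
      intro mm hmm h
      have hmm0 : mm = "" := by simpa using h
      exact hpre (hmm0 ▸ hmm)
    have hlen : ((m0 :: rest).map (fun m => (m.toList.length : Int))).length > 0 := by simp
    obtain ⟨v, hv⟩ : ∃ v, PySem.List.min? ((m0 :: rest).map (fun m => (m.toList.length : Int))) (fun x => x) = some v := by
      cases h : PySem.List.min? ((m0 :: rest).map (fun m => (m.toList.length : Int))) (fun x => x) with
      | none => rw [PySem.List.min?_eq_none_iff] at h; simp at h
      | some v => exact ⟨v, rfl⟩
    have hS : ∀ mm ∈ m0 :: rest, v ≤ (mm.toList.length : Int) := by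
      intro mm hmm
      simpa using PySem.List.min?_isMin hv ((mm.toList.length : Int)) (List.mem_map_of_mem hmm)
    have hS1 : 1 ≤ v := by
      obtain ⟨mm, hmm, he⟩ := List.mem_map.mp (PySem.List.min?_mem hv)
      have h0 : mm.toList.length ≠ 0 := by
        simpa [List.length_eq_zero_iff] using hne mm hmm
      omega
    show fmisLoopA s.toList (m0 :: rest)
        (if ((m0 :: rest).map (fun m => (m.toList.length : Int))).length > 0
          then (PySem.List.min? ((m0 :: rest).map (fun m => (m.toList.length : Int))) (fun x => x)).getD 0
          else 0)
        (s.toList.length + 1) 0 [] = fmisLoopB s.toList (fmisBuckets (m0 :: rest)) (s.toList.length + 1) 0 []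
    rw [if_pos hlen, hv, Option.getD_some]
    have h0 := main_loop_eq s.toList (m0 :: rest) v hne hS1 hS (s.toList.length + 1) 0 []
    simpa using h0
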